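-- pv_equiv track=rewrite | github.com/juliaburun/ejs_finales | 6.py | encontrar_secuencia_mas_larga
-- ===== SOURCE A (Python) =====
-- def encontrar_secuencia_mas_larga(secuencias):
--     longitud_maxima = 0
--     secuencias_mas_largas = []
--     secuencia_actual = []
--
--     for num in secuencias:
--         if num != 0:
--             secuencia_actual.append(num)
--         else:
--             if len(secuencia_actual) > longitud_maxima:
--                 longitud_maxima = len(secuencia_actual)
--                 secuencias_mas_largas = [secuencia_actual]
--             elif len(secuencia_actual) == longitud_maxima:
--                 secuencias_mas_largas.append(secuencia_actual)
--             secuencia_actual = []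
--
--     return secuencias_mas_largas
-- ===== SOURCE B (Python) =====
-- def encontrar_secuencia_mas_larga(secuencias):
--     # Two passes: split into zero-terminated segments (empty segments kept,
--     # trailing run after the last zero discarded), then select the max-length ones.
--     segmentos = []
--     actual = []
--     for num in secuencias:
--         if num == 0:
--             segmentos.append(actual)
--             actual = []
--         else:
--             actual.append(num)
--     if not segmentos:
--         return []
--     m = max(len(s) for s in segmentos)
--     return [s for s in segmentos if len(s) == m]
-- ===== Notes on version B (the rewrite author's own statement) =====
-- stated objective: simpler
-- what changed: Replaces A's interleaved running-max/reset bookkeeping with two plain passes: split the input into zero-terminated segments, then keep the segments of maximal length.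
import Mathlib
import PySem

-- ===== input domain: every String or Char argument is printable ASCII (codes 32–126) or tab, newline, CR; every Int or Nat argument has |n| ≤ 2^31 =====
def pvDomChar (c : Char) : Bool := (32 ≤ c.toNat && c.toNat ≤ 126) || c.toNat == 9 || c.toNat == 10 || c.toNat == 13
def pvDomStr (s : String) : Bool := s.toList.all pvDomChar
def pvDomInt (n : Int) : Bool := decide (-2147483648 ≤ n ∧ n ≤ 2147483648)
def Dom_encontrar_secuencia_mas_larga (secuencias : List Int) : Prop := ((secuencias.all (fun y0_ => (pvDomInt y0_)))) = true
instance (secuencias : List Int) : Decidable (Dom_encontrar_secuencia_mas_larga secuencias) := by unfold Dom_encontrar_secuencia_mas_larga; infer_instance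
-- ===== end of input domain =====

-- B replaces A's interleaved running-max bookkeeping with two plain passes
-- (split on zeros, then keep max-length segments); same asymptotic cost.
-- ===== PORT A =====
def pvStepA (st : Nat × List (List Int) × List Int) (num : Int) : Nat × List (List Int) × List Int :=
  if num ≠ 0 then (st.1, st.2.1, st.2.2 ++ [num])
  else if st.2.2.length > st.1 then (st.2.2.length, [st.2.2], [])
  else if st.2.2.length == st.1 then (st.1, st.2.1 ++ [st.2.2], ([] : List Int))
  else (st.1, st.2.1, ([] : List Int))

def encontrar_secuencia_mas_larga (secuencias : List Int) : List (List Int) :=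
  (secuencias.foldl pvStepA (0, [], [])).2.1

-- ===== PORT B =====
def pvStepB (st : List (List Int) × List Int) (num : Int) : List (List Int) × List Int :=
  if num == 0 then (st.1 ++ [st.2], ([] : List Int)) else (st.1, st.2 ++ [num])

def encontrar_secuencia_mas_larga_alt (secuencias : List Int) : List (List Int) :=
  let segmentos := (secuencias.foldl pvStepB ([], [])).1
  if segmentos.isEmpty then []
  else
    let m := (segmentos.map List.length).foldl max 0
    segmentos.filter (fun s => s.length == m)

-- ===== PRECONDITION & SPEC =====
def Spec_encontrar_secuencia_mas_larga (secuencias : List Int) (out : List (List Int)) : Prop := out = encontrar_secuencia_mas_larga_alt secuencias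
instance (secuencias : List Int) (out : List (List Int)) : Decidable (Spec_encontrar_secuencia_mas_larga secuencias out) := by unfold Spec_encontrar_secuencia_mas_larga; infer_instance

-- ===== CLAIM (what is proved, stated in full; the proofs are below) =====
def Claim_equal_encontrar_secuencia_mas_larga : Prop := ∀ (secuencias : List Int), Dom_encontrar_secuencia_mas_larga secuencias → Spec_encontrar_secuencia_mas_larga secuencias (encontrar_secuencia_mas_larga secuencias)

-- ===== LEMMAS AND PROOFS =====

-- ===== VERDICT (by name: the statement is the Claim_ definition above) =====
def pvM (segs : List (List Int)) : Nat := (segs.map List.length).foldl max 0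
def pvF (segs : List (List Int)) : List (List Int) := segs.filter (fun s => s.length == pvM segs)

theorem init_le_foldl_max : ∀ (l : List Nat) (a : Nat), a ≤ l.foldl max a := by
  intro l
  induction l with
  | nil => intro a; simp
  | cons b t ih => intro a; exact le_trans (le_max_left a b) (ih (max a b))

theorem mem_le_foldl_max : ∀ (l : List Nat) (a x : Nat), x ∈ l → x ≤ l.foldl max a := by
  intro l
  induction l with
  | nil => intro a x h; simp at h
  | cons b t ih =>
    intro a x h
    rcases List.mem_cons.mp h with h | h
    · subst h; exact le_trans (le_max_right a x) (init_le_foldl_max t (max a x))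
    · exact ih (max a b) x h

theorem pvM_append (segs : List (List Int)) (c : List Int) :
    pvM (segs ++ [c]) = max (pvM segs) c.length := by
  simp [pvM, List.foldl_append]

theorem mem_le_pvM (segs : List (List Int)) (s : List Int) (h : s ∈ segs) :
    s.length ≤ pvM segs := by
  exact mem_le_foldl_max _ 0 _ (List.mem_map_of_mem h)

theorem pvF_append (segs : List (List Int)) (c : List Int) :
    pvF (segs ++ [c]) =
      if c.length > pvM segs then [c]
      else if c.length == pvM segs then pvF segs ++ [c]
      else pvF segs := by
  unfold pvF
  rw [pvM_append]
  by_cases h : c.length > pvM segs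
  · have hm : max (pvM segs) c.length = c.length := by omega
    rw [hm]
    simp only [if_pos h, List.filter_append]
    have : segs.filter (fun s => s.length == c.length) = [] := by
      rw [List.filter_eq_nil_iff]
      intro s hs
      have := mem_le_pvM segs s hs
      simp only [beq_iff_eq]
      omega
    simp [this]
  · have hm : max (pvM segs) c.length = pvM segs := by omega
    rw [hm]
    simp only [if_neg h, List.filter_append]
    by_cases he : c.length = pvM segs
    · simp [he]
    · simp [he, beq_iff_eq]

theorem loop_eq : ∀ (xs : List Int) (segs : List (List Int)) (cur : List Int),
    xs.foldl pvStepA (pvM segs, pvF segs, cur)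
      = (pvM (xs.foldl pvStepB (segs, cur)).1,
         pvF (xs.foldl pvStepB (segs, cur)).1,
         (xs.foldl pvStepB (segs, cur)).2) := by
  intro xs
  induction xs with
  | nil => intro segs cur; simp
  | cons x t ih =>
    intro segs cur
    by_cases hx : x = 0
    · subst hx
      have hA : pvStepA (pvM segs, pvF segs, cur) 0 = (pvM (segs ++ [cur]), pvF (segs ++ [cur]), []) := by
        simp only [pvStepA, pvM_append, pvF_append]
        by_cases h1 : cur.length > pvM segs
        · have : max (pvM segs) cur.length = cur.length := by omega
          simp [h1, this]
        · have : max (pvM segs) cur.length = pvM segs := by omega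
          by_cases h2 : cur.length = pvM segs <;> simp [h1, h2, this]
      have hB : pvStepB (segs, cur) 0 = (segs ++ [cur], []) := by simp [pvStepB]
      simp only [List.foldl_cons, hA, hB]
      exact ih (segs ++ [cur]) []
    · have hA : pvStepA (pvM segs, pvF segs, cur) x = (pvM segs, pvF segs, cur ++ [x]) := by
        simp [pvStepA, hx]
      have hB : pvStepB (segs, cur) x = (segs, cur ++ [x]) := by simp [pvStepB, hx]
      simp only [List.foldl_cons, hA, hB]
      exact ih segs (cur ++ [x])

theorem encontrar_secuencia_mas_larga_spec : Claim_equal_encontrar_secuencia_mas_larga := by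
  intro xs _
  unfold Spec_encontrar_secuencia_mas_larga
  unfold encontrar_secuencia_mas_larga encontrar_secuencia_mas_larga_alt
  have h0 : pvM ([] : List (List Int)) = 0 := by simp [pvM]
  have hF0 : pvF ([] : List (List Int)) = [] := by simp [pvF]
  have := loop_eq xs [] []
  rw [h0, hF0] at this
  rw [this]
  set segs := (xs.foldl pvStepB ([], [])).1 with hsegs
  by_cases he : segs.isEmpty
  · rw [List.isEmpty_iff] at he
    simp [he, pvF]
  · simp only [he, if_neg, Bool.false_eq_true, not_false_iff]
    rfl
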